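-- pv_equiv track=rewrite | github.com/varnish/zipnish | ui/app/utils.py | findSpanDepth
-- ===== SOURCE A (Python) =====
-- def findChildSpans(parent_id, dictionary):
--     span_ids = []
--
--     for key in dictionary:
--         if key != parent_id and dictionary[key] == parent_id:
--             span_ids.append(key)
--
--     return span_ids
--
-- def findSpanDepth(current_depth, selected_span_id, parent_ids, dictionary):
--     if selected_span_id in parent_ids:
--         # find all the spans to which current_span is a parent and find the depth of each of them
--         # selected the highest possible span depth
--         #return findSpanDepth(current_depth + 1, selected_span_id, parent_ids, dictionary)
--         childSpans = findChildSpans(selected_span_id, dictionary)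
--
--         if len(childSpans) == 0:
--             return current_depth
--
--         maxDepth = current_depth
--         for child_span_id in childSpans:
--             maxDepth = max(maxDepth, findSpanDepth(current_depth + 1, child_span_id, parent_ids, dictionary))
--
--         return maxDepth
--
--     return current_depth
-- ===== SOURCE B (Python) =====
-- def findSpanDepth(current_depth, selected_span_id, parent_ids, dictionary):
--     # Iterative breadth-first traversal by levels: the answer is the depth of the
--     # deepest non-empty level, since every expanded node's children lie one level
--     # deeper (each dict key has a single parent, so the child relation is a forest).
--     children = {}
--     for key in dictionary:
--         parent = dictionary[key]
--         if key != parent: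
--             children.setdefault(parent, []).append(key)
--     parent_set = set(parent_ids)
--
--     depth = current_depth
--     frontier = [selected_span_id]
--     while True:
--         nxt = [c for n in frontier if n in parent_set for c in children.get(n, [])]
--         if not nxt:
--             return depth
--         depth += 1
--         frontier = nxt
-- ===== Notes on version B (the rewrite author's own statement) =====
-- stated objective: alternative
-- what changed: B replaces A's depth-first recursion that rescans the whole dictionary at every node by an iterative level-by-level frontier loop over a parent->children index built once, returning current_depth plus the number of non-empty levels.
import Mathlib
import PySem

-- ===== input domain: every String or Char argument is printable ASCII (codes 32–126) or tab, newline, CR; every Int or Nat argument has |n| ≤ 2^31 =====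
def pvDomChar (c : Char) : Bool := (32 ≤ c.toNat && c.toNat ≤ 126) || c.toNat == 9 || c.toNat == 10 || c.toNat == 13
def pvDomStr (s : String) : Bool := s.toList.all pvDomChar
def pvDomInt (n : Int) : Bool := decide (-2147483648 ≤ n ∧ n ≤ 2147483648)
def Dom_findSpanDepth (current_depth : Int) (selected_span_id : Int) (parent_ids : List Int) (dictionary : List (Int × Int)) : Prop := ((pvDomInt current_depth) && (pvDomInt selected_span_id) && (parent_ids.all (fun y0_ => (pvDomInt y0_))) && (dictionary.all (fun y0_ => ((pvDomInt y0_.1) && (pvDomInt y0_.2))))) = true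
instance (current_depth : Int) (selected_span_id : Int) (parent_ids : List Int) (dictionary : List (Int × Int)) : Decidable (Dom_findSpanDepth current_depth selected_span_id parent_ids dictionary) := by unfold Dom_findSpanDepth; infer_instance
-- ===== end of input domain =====

-- B replaces A's per-node recursion with dict rescans by an iterative level-by-level frontier
-- loop over a parent→children index built once; same return value (objective: alternative).


-- ===== PORT A =====
-- findChildSpans: 'for key in dictionary: if key != parent_id and dictionary[key] == parent_id: append'
-- (dictionary[key] never raises here since key ranges over the dict's own keys, so getD is exact)
def findChildSpans (parent_id : Int) (d : PySem.Dict Int Int) : List Int :=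
  d.keys.foldl
    (fun span_ids key =>
      if key ≠ parent_id ∧ d.getD key 0 = parent_id then span_ids ++ [key] else span_ids) []

-- A's recursion with a fuel counter; inside Pre_ (no recursion cycle) every expanded call path
-- visits distinct dict keys, so fuel = dictionary.length + 1 is never exhausted there.
def findSpanDepthGo (fuel : Nat) (current_depth : Int) (selected_span_id : Int)
    (parent_ids : List Int) (d : PySem.Dict Int Int) : Int :=
  match fuel with
  | 0 => current_depth
  | fuel + 1 =>
    if selected_span_id ∈ parent_ids then
      let childSpans := findChildSpans selected_span_id d
      if childSpans = [] then current_depth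
      else
        childSpans.foldl
          (fun maxDepth child_span_id =>
            max maxDepth (findSpanDepthGo fuel (current_depth + 1) child_span_id parent_ids d))
          current_depth
    else current_depth

def findSpanDepth (current_depth : Int) (selected_span_id : Int) (parent_ids : List Int) (dictionary : List (Int × Int)) : Int :=
  findSpanDepthGo (dictionary.length + 1) current_depth selected_span_id parent_ids
    (PySem.Dict.ofList dictionary)

-- ===== PORT B =====
-- 'children.setdefault(parent, []).append(key)' = Dict.modify parent [] (· ++ [key])
def buildChildren (d : PySem.Dict Int Int) : PySem.Dict Int (List Int) :=
  d.keys.foldl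
    (fun children key =>
      let parent := d.getD key 0
      if key ≠ parent then children.modify parent [] (· ++ [key]) else children)
    PySem.Dict.empty

-- the 'while True' frontier loop, with a fuel counter making it total (same fuel as A's port;
-- inside Pre_ the level count is bounded by the number of dict keys)
def bfsGo (fuel : Nat) (parent_set : PySem.Set Int) (children : PySem.Dict Int (List Int))
    (depth : Int) (frontier : List Int) : Int :=
  match fuel with
  | 0 => depth
  | fuel + 1 =>
    let nxt := frontier.flatMap
      (fun n => if PySem.Set.contains parent_set n then children.getD n [] else [])
    if nxt = [] then depth
    else bfsGo fuel parent_set children (depth + 1) nxt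

def findSpanDepth_alt (current_depth : Int) (selected_span_id : Int) (parent_ids : List Int) (dictionary : List (Int × Int)) : Int :=
  let d := PySem.Dict.ofList dictionary
  let children := buildChildren d
  let parent_set := PySem.Set.ofList parent_ids
  bfsGo (dictionary.length + 1) parent_set children current_depth [selected_span_id]

-- ===== PRECONDITION & SPEC =====
-- parent-map chain: x, d[x], d[d[x]], … (none once a node is not a key)
def pchain (d : PySem.Dict Int Int) (x : Int) : Nat → Option Int
  | 0 => some x
  | n + 1 =>
    match pchain d x n with
    | some y => d.get? y
    | none => none

-- Pre_ excludes exactly the inputs on which Python A raises RecursionError: a dict-cycle through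
-- selected_span_id whose nodes all lie in parent_ids with consecutive nodes distinct (A recurses
-- around such a cycle forever; everywhere else A returns).
def Pre_findSpanDepth (current_depth : Int) (selected_span_id : Int) (parent_ids : List Int) (dictionary : List (Int × Int)) : Prop :=
  (let d := PySem.Dict.ofList dictionary
   (List.range (d.keys.length + 1)).any (fun m =>
     decide (1 ≤ m) && (pchain d selected_span_id m == some selected_span_id) &&
     (List.range m).all (fun i =>
       match pchain d selected_span_id i with
       | some y => decide (y ∈ parent_ids) && !(pchain d selected_span_id (i + 1) == some y)
       | none => false))) = false
instance (current_depth : Int) (selected_span_id : Int) (parent_ids : List Int) (dictionary : List (Int × Int)) : Decidable (Pre_findSpanDepth current_depth selected_span_id parent_ids dictionary) := by unfold Pre_findSpanDepth; infer_instance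

def pvWitness_findSpanDepth : Int × Int × List Int × (List (Int × Int)) :=
  (0, 1, [1, 2], [(2, 1), (3, 2)])

def Spec_findSpanDepth (current_depth : Int) (selected_span_id : Int) (parent_ids : List Int) (dictionary : List (Int × Int)) (out : Int) : Prop := out = findSpanDepth_alt current_depth selected_span_id parent_ids dictionary
instance (current_depth : Int) (selected_span_id : Int) (parent_ids : List Int) (dictionary : List (Int × Int)) (out : Int) : Decidable (Spec_findSpanDepth current_depth selected_span_id parent_ids dictionary out) := by unfold Spec_findSpanDepth; infer_instance

-- ===== CLAIM (what is proved, stated in full; the proofs are below) =====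
def Claim_equal_findSpanDepth : Prop := ∀ (current_depth : Int) (selected_span_id : Int) (parent_ids : List Int) (dictionary : List (Int × Int)), Dom_findSpanDepth current_depth selected_span_id parent_ids dictionary → Pre_findSpanDepth current_depth selected_span_id parent_ids dictionary → Spec_findSpanDepth current_depth selected_span_id parent_ids dictionary (findSpanDepth current_depth selected_span_id parent_ids dictionary)

-- ===== LEMMAS AND PROOFS =====
-- A's child list as a filter of the key list
theorem findChildSpans_eq_filter (p : Int) (d : PySem.Dict Int Int) :
    findChildSpans p d =
      d.keys.filter (fun k => decide (k ≠ p) && decide (d.getD k 0 = p)) := by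
  unfold findChildSpans
  have h := PySem.List.foldl_append_if
    (fun k => decide (k ≠ p) && decide (d.getD k 0 = p)) (fun k : Int => k) d.keys []
  simp only [List.nil_append, List.map_id'] at h
  rw [← h]
  apply PySem.List.foldl_congr_mem
  intro acc k _
  by_cases h1 : k ≠ p <;> by_cases h2 : d.getD k 0 = p <;> simp [h1, h2]

-- B's index, rewritten as the canonical modify-fold over (parent, key) pairs
theorem buildChildren_eq_pairs (d : PySem.Dict Int Int) :
    buildChildren d =
      ((d.keys.filter (fun k => decide (k ≠ d.getD k 0))).map (fun k => (d.getD k 0, k))).foldl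
        (fun ch q => ch.modify q.1 [] (· ++ [q.2])) PySem.Dict.empty := by
  unfold buildChildren
  generalize (PySem.Dict.empty : PySem.Dict Int (List Int)) = ch
  induction d.keys generalizing ch with
  | nil => rfl
  | cons k ks ih =>
    by_cases h : k ≠ d.getD k 0
    · simp only [List.foldl_cons, List.filter_cons]
      rw [if_pos h, if_pos (by simpa using h)]
      simp only [List.map_cons, List.foldl_cons]
      exact ih _
    · simp only [List.foldl_cons, List.filter_cons]
      rw [if_neg h, if_neg (by simpa using h)]
      exact ih _

-- B's precomputed index answers exactly A's per-call scan
theorem getD_buildChildren (d : PySem.Dict Int Int) (p : Int) :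
    (buildChildren d).getD p [] = findChildSpans p d := by
  rw [buildChildren_eq_pairs, PySem.Dict.getD_foldl_modify_append, findChildSpans_eq_filter]
  simp only [PySem.Dict.getD_empty, List.nil_append, List.filter_map, List.filter_filter,
    List.map_map, Function.comp]
  have hm : ∀ l : List Int,
      List.map ((fun x : Int × Int => x.2) ∘ fun k : Int => (d.getD k 0, k)) l = l := by
    intro l; simp [Function.comp_def]
  rw [hm]
  apply List.filter_congr
  intro a _
  by_cases hp : d.getD a 0 = p
  · simp [hp, Bool.and_comm]
  · simp [hp]

-- "expand" step shared by both readings: children of n if n is a parent, else nothing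
def expandOf (parent_ids : List Int) (d : PySem.Dict Int Int) (n : Int) : List Int :=
  if n ∈ parent_ids then findChildSpans n d else []

-- A's go, one level, as a running max over the expansion
theorem go_succ_eq_foldl (f : Nat) (cd n : Int) (pids : List Int) (d : PySem.Dict Int Int) :
    findSpanDepthGo (f + 1) cd n pids d =
      (expandOf pids d n).foldl
        (fun m c => max m (findSpanDepthGo f (cd + 1) c pids d)) cd := by
  conv_lhs => rw [findSpanDepthGo.eq_def]
  unfold expandOf
  by_cases hm : n ∈ pids
  · by_cases hnil : findChildSpans n d = [] <;> simp [hm, hnil]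
  · simp [hm]

theorem go_ge (f : Nat) : ∀ (cd n : Int) (pids : List Int) (d : PySem.Dict Int Int),
    cd ≤ findSpanDepthGo f cd n pids d := by
  induction f with
  | zero => intro cd n pids d; exact le_refl _
  | succ f ih =>
    intro cd n pids d
    rw [go_succ_eq_foldl]
    calc cd ≤ _ := (PySem.List.le_foldl_max_int (expandOf pids d n)
      (fun c => findSpanDepthGo f (cd + 1) c pids d) cd).1

-- pull a max out of a running-max fold
theorem foldl_max_pull (g : Int → Int) (l : List Int) :
    ∀ a b : Int, l.foldl (fun x c => max x (g c)) (max b a) =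
      max b (l.foldl (fun x c => max x (g c)) a) := by
  induction l with
  | nil => intro a b; rfl
  | cons c l ih =>
    intro a b
    simp only [List.foldl_cons, max_assoc]
    exact ih _ _

-- one whole level: folding A's (f+1)-go over a frontier = folding f-go over the flattened expansion
theorem level_step (f : Nat) (cd : Int) (pids : List Int) (d : PySem.Dict Int Int) :
    ∀ (F : List Int) (m : Int), cd ≤ m →
      F.foldl (fun x n => max x (findSpanDepthGo (f + 1) cd n pids d)) m =
        (F.flatMap (expandOf pids d)).foldl
          (fun x c => max x (findSpanDepthGo f (cd + 1) c pids d)) m := by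
  intro F
  induction F with
  | nil => intro m _; rfl
  | cons n F ih =>
    intro m hm
    simp only [List.foldl_cons, List.flatMap_cons, List.foldl_append]
    rw [go_succ_eq_foldl]
    have hmax : max m ((expandOf pids d n).foldl
        (fun x c => max x (findSpanDepthGo f (cd + 1) c pids d)) cd) =
        (expandOf pids d n).foldl
          (fun x c => max x (findSpanDepthGo f (cd + 1) c pids d)) m := by
      rw [← foldl_max_pull]
      congr 1
      omega
    rw [hmax]
    exact ih _ (le_trans hm
      (PySem.List.le_foldl_max_int (expandOf pids d n)
        (fun c => findSpanDepthGo f (cd + 1) c pids d) m).1)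

-- B's frontier loop computes the running max of A's go over the frontier
theorem bfs_eq_foldl_go (pids : List Int) (d : PySem.Dict Int Int) (f : Nat) :
    ∀ (cd : Int) (F : List Int),
      bfsGo f (PySem.Set.ofList pids) (buildChildren d) cd F =
        F.foldl (fun m n => max m (findSpanDepthGo f cd n pids d)) cd := by
  induction f with
  | zero =>
    intro cd F
    show cd = _
    induction F with
    | nil => rfl
    | cons n F ihF => simpa [findSpanDepthGo] using ihF
  | succ f ih =>
    intro cd F
    have hexp : (fun n => if PySem.Set.contains (PySem.Set.ofList pids) n
        then (buildChildren d).getD n [] else []) = expandOf pids d := by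
      funext n
      by_cases h : n ∈ pids
      · rw [if_pos (by rw [PySem.Set.contains_iff, PySem.Set.mem_ofList]; exact h),
          getD_buildChildren]
        simp [expandOf, h]
      · rw [if_neg (by rw [PySem.Set.contains_iff, PySem.Set.mem_ofList]; exact h)]
        simp [expandOf, h]
    unfold bfsGo
    simp only [hexp]
    rw [level_step f cd pids d F cd (le_refl cd)]
    by_cases hnil : F.flatMap (expandOf pids d) = []
    · simp [hnil]
    · rw [if_neg hnil, ih]
      obtain ⟨c, rest, hF⟩ := List.exists_cons_of_ne_nil hnil
      rw [hF]
      simp only [List.foldl_cons]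
      congr 1
      have hge : cd + 1 ≤ findSpanDepthGo f (cd + 1) c pids d := go_ge f _ _ _ _
      omega

-- ===== VERDICT (by name: the statement is the Claim_ definition above) =====
theorem findSpanDepth_spec : Claim_equal_findSpanDepth := by
  intro cd sid pids dict _ _
  unfold Spec_findSpanDepth findSpanDepth findSpanDepth_alt
  rw [bfs_eq_foldl_go]
  simp only [List.foldl_cons, List.foldl_nil]
  have := go_ge (dict.length + 1) cd sid pids (PySem.Dict.ofList dict)
  omega
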